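-- pv_equiv track=rewrite | github.com/MrBrantCode/unitest_baseline | mut_generate/mist_train_cf/cf_45478/solution.py | segregate_numbers
-- ===== SOURCE A (Python) =====
-- def segregate_numbers(lst):
--     def fib_check(n):
--         if n < 1:
--             return False
--         elif n == 1:
--             return True
--         else:
--             a, b = 1, 1
--             while b < n:
--                 a, b = b, a+b
--             return b == n
--
--     fib_numbers = []
--     non_fib_numbers = []
--
--     for num in lst:
--         if fib_check(num):
--             fib_numbers.append(num)
--         else:
--             non_fib_numbers.append(num)
--
--     return fib_numbers, non_fib_numbers
-- ===== SOURCE B (Python) =====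
-- def segregate_numbers(lst):
--     # Build the set of Fibonacci numbers up to max(lst) once, then partition
--     # with O(1) membership tests (A regenerates the sequence for every element).
--     m = max(lst, default=0)
--     fib_set = set()
--     a, b = 1, 1
--     while a <= m:
--         fib_set.add(a)
--         a, b = b, a + b
--     fib_numbers = []
--     non_fib_numbers = []
--     for num in lst:
--         if num in fib_set:
--             fib_numbers.append(num)
--         else:
--             non_fib_numbers.append(num)
--     return fib_numbers, non_fib_numbers
-- ===== Notes on version B (the rewrite author's own statement) =====
-- stated objective: faster
-- what changed: Instead of regenerating the Fibonacci sequence from scratch for every element, B generates the Fibonacci numbers up to max(lst) once into a set and partitions with O(1) membership tests.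
import Mathlib
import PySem

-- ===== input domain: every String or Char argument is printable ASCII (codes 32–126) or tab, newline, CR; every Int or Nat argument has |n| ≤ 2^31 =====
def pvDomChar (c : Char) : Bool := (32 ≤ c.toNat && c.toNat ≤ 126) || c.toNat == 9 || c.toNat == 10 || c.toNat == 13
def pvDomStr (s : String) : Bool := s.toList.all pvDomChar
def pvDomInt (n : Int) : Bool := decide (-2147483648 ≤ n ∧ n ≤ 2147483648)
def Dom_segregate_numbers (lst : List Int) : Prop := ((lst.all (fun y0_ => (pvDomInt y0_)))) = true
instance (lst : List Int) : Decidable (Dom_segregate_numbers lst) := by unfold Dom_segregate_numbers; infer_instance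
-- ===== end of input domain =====

-- B builds the set of Fibonacci numbers up to max(lst) once and partitions with
-- membership tests, instead of A's per-element regeneration of the sequence (objective: faster, constant factor).

-- ===== PORT A =====
-- the 'while b < n: a, b = b, a+b' loop of fib_check; the proof arguments 1 ≤ a ≤ b
-- are invariants of the actual call (a, b start at 1, 1) used only for termination
def pvFibWhile (a b n : Int) (ha : 1 ≤ a) (hab : a ≤ b) : Bool :=
  if h : b < n then pvFibWhile b (a + b) n (le_trans ha hab) (by omega)
  else b == n
termination_by (n - b).toNat
decreasing_by omega

def pvFibCheck (n : Int) : Bool :=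
  if n < 1 then false
  else if n == 1 then true
  else pvFibWhile 1 1 n (by norm_num) (by norm_num)

def segregate_numbers (lst : List Int) : List Int × List Int :=
  lst.foldl
    (fun p num => if pvFibCheck num then (p.1 ++ [num], p.2) else (p.1, p.2 ++ [num]))
    ([], [])

-- ===== PORT B =====
-- the 'while a <= m: fib_set.add(a); a, b = b, a+b' loop of B; proof arguments as above
def pvGenFibs (a b m : Int) (s : PySem.Set Int) (ha : 1 ≤ a) (hab : a ≤ b) : PySem.Set Int :=
  if h : a ≤ m then pvGenFibs b (a + b) m (PySem.Set.add s a) (le_trans ha hab) (by omega)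
  else s
termination_by ((m + 1 - a).toNat + (m + 1 - b).toNat)
decreasing_by omega

def segregate_numbers_alt (lst : List Int) : List Int × List Int :=
  let m := (PySem.List.max? lst (fun x => x)).getD 0
  let fibs := pvGenFibs 1 1 m PySem.Set.empty (by norm_num) (by norm_num)
  lst.foldl
    (fun p num => if PySem.Set.contains fibs num then (p.1 ++ [num], p.2) else (p.1, p.2 ++ [num]))
    ([], [])

-- ===== PRECONDITION & SPEC =====
def Spec_segregate_numbers (lst : List Int) (out : List Int × List Int) : Prop := out = segregate_numbers_alt lst
instance (lst : List Int) (out : List Int × List Int) : Decidable (Spec_segregate_numbers lst out) := by unfold Spec_segregate_numbers; infer_instance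

-- ===== CLAIM (what is proved, stated in full; the proofs are below) =====
def Claim_equal_segregate_numbers : Prop := ∀ (lst : List Int), Dom_segregate_numbers lst → Spec_segregate_numbers lst (segregate_numbers lst)

-- ===== LEMMAS AND PROOFS =====

-- joint characterisation of B's generating loop against A's testing loop
theorem pvG (m n a b : Int) (s : PySem.Set Int) (ha : 1 ≤ a) (hab : a ≤ b) (hnm : n ≤ m) :
    (n ∈ pvGenFibs a b m s ha hab) ↔ (n ∈ s ∨ n = a ∨ pvFibWhile a b n ha hab = true) := by
  by_cases h : a ≤ m
  · rw [pvGenFibs, dif_pos h]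
    rw [pvG m n b (a + b) (PySem.Set.add s a) (le_trans ha hab) (by omega) hnm]
    rw [PySem.Set.mem_add]
    conv_rhs => rw [pvFibWhile]
    by_cases hb : b < n
    · rw [dif_pos hb]
      constructor
      · rintro ((hs | rfl) | rfl | hw)
        · exact Or.inl hs
        · exact Or.inr (Or.inl rfl)
        · omega
        · exact Or.inr (Or.inr hw)
      · rintro (hs | rfl | hw)
        · exact Or.inl (Or.inl hs)
        · exact Or.inl (Or.inr rfl)
        · exact Or.inr (Or.inr hw)
    · rw [dif_neg hb]
      rw [pvFibWhile, dif_neg (by omega : ¬ (a + b) < n)]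
      constructor
      · rintro ((hs | rfl) | rfl | hw)
        · exact Or.inl hs
        · exact Or.inr (Or.inl rfl)
        · exact Or.inr (Or.inr (by simp))
        · have : a + b = n := by simpa using hw
          omega
      · rintro (hs | rfl | hw)
        · exact Or.inl (Or.inl hs)
        · exact Or.inl (Or.inr rfl)
        · have : b = n := by simpa using hw
          exact Or.inr (Or.inl this.symm)
  · rw [pvGenFibs, dif_neg h]
    rw [pvFibWhile, dif_neg (by omega : ¬ b < n)]
    constructor
    · exact fun hs => Or.inl hs
    · rintro (hs | rfl | hw)
      · exact hs
      · omega
      · exact absurd (by simpa using hw) (by omega)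
termination_by ((m + 1 - a).toNat + (m + 1 - b).toNat)
decreasing_by omega

-- pointwise: A's fib_check agrees with membership in B's set, for n ≤ m
theorem pv_pointwise (m n : Int) (hnm : n ≤ m) :
    pvFibCheck n = PySem.Set.contains (pvGenFibs 1 1 m PySem.Set.empty (by norm_num) (by norm_num)) n := by
  have hG := pvG m n 1 1 PySem.Set.empty (by norm_num) (by norm_num) hnm
  rw [Bool.eq_iff_iff, PySem.Set.contains_iff]
  refine Iff.trans ?_ hG.symm
  unfold pvFibCheck
  constructor
  · intro h
    by_cases h1 : n < 1
    · rw [if_pos h1] at h; exact absurd h (by simp)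
    · rw [if_neg h1] at h
      by_cases he : n = 1
      · exact Or.inr (Or.inl he)
      · rw [if_neg (by simp [he])] at h
        exact Or.inr (Or.inr h)
  · rintro (hs | rfl | hw)
    · exact absurd hs List.not_mem_nil
    · norm_num
    · by_cases h1 : n < 1
      · rw [pvFibWhile, dif_neg (by omega : ¬ (1 : Int) < n)] at hw
        have : (1 : Int) = n := by simpa using hw
        omega
      · rw [if_neg h1]
        by_cases he : n = 1
        · simp [he]
        · rw [if_neg (by simp [he])]
          exact hw

-- the two partition folds agree as soon as the element tests agree on the list
theorem pv_fold_congr (f g : Int → Bool) (l : List Int)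
    (h : ∀ x ∈ l, f x = g x) (p : List Int × List Int) :
    l.foldl (fun p num => if f num then (p.1 ++ [num], p.2) else (p.1, p.2 ++ [num])) p
      = l.foldl (fun p num => if g num then (p.1 ++ [num], p.2) else (p.1, p.2 ++ [num])) p := by
  induction l generalizing p with
  | nil => rfl
  | cons x t ih =>
    simp only [List.foldl_cons]
    rw [h x (List.mem_cons_self ..)]
    exact ih (fun y hy => h y (List.mem_cons_of_mem _ hy)) _

-- ===== VERDICT (by name: the statement is the Claim_ definition above) =====
theorem segregate_numbers_spec : Claim_equal_segregate_numbers := by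
  intro lst _
  unfold Spec_segregate_numbers segregate_numbers segregate_numbers_alt
  apply pv_fold_congr
  intro x hx
  apply pv_pointwise
  rcases hm : PySem.List.max? lst (fun x => x) with _ | mm
  · rw [PySem.List.max?_eq_none_iff] at hm
    subst hm; cases hx
  · simpa using PySem.List.max?_isMax hm x hx
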